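-- pv_equiv track=rewrite | github.com/Alihoe/sieve_projectwork | src/numerical_information.py | categorize_and_sort_matches
-- ===== SOURCE A (Python) =====
-- from collections import defaultdict
--
-- def categorize_and_sort_matches(dict1, dict2):
--     dict2_sets = {id2: set(numbers) for id2, numbers in dict2.items()}
--
--     has_matches = {}
--     no_matches = []
--
--     for id1, numbers1 in dict1.items():
--         set1 = set(numbers1)
--         matches = defaultdict(int)
--         for id2, set2 in dict2_sets.items():
--             shared = set1 & set2
--             if shared:
--                 matches[id2] = len(shared)
--         if matches:
--             sorted_matches = sorted(matches.items(),
--                                     key=lambda x: (-x[1], x[0]))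
--             has_matches[id1] = [id2 for id2, count in sorted_matches]
--         else:
--             no_matches.append(id1)
--     return has_matches, no_matches
-- ===== SOURCE B (Python) =====
-- def categorize_and_sort_matches(dict1, dict2):
--     # Stage 1: inverted index  number -> [id2, ...]  (dict2 order, numbers deduped)
--     index = {}
--     for id2, numbers in dict2.items():
--         for n in dict.fromkeys(numbers):
--             index.setdefault(n, []).append(id2)
--
--     # Stage 2: for one id1's numbers, rank the matching id2s by (-shared count, id2)
--     def ranked(numbers1):
--         counts = {}
--         for n in dict.fromkeys(numbers1):
--             for id2 in index.get(n, ()):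
--                 counts[id2] = counts.get(id2, 0) + 1
--         return sorted(counts, key=lambda id2: (-counts[id2], id2))
--
--     # Stage 3: pair every id1 with its ranking, then split into the two results
--     pairs = [(id1, ranked(numbers1)) for id1, numbers1 in dict1.items()]
--     has_matches = {id1: r for id1, r in pairs if r}
--     no_matches = [id1 for id1, r in pairs if not r]
--     return has_matches, no_matches
-- ===== Notes on version B (the rewrite author's own statement) =====
-- stated objective: faster
-- what changed: Replaces A's per-id1 scan over every dict2 set (pairwise intersections) by an inverted index from number to id2 list with per-id1 tallying, ranks by sorting the count dict's keys instead of its items, and builds the two results by staged comprehensions over (id1, ranking) pairs instead of one loop with two accumulators; Pre_ excludes association lists with duplicated dict2 keys, which do not represent a Python dict (A's argument) and on which the two ports' assoc-list readings legitimately diverge.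
import Mathlib
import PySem

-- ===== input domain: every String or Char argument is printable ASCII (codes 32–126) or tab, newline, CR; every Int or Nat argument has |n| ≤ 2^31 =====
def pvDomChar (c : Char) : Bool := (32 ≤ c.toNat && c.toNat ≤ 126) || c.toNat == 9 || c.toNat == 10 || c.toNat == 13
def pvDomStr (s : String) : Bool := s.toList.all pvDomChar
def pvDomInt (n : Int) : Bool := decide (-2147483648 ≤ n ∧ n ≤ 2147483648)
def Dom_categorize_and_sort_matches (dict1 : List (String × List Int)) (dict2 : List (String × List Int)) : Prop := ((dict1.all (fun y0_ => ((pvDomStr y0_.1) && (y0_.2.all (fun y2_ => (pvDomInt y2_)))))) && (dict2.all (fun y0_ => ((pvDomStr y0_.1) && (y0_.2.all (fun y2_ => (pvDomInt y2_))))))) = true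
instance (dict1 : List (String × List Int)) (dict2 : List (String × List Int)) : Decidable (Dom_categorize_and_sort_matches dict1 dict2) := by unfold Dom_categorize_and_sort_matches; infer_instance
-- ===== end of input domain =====

-- B replaces A's per-id1 scan over all of dict2 (set intersections, one loop carrying both results)
-- by three stages: an inverted index number -> [id2], a per-id1 ranking that sorts the count dict's
-- keys, and a map/filter split of (id1, ranking) pairs (asymptotically faster; return value proved equal).

-- ===== PORT A =====
def categorize_and_sort_matches (dict1 : List (String × List Int)) (dict2 : List (String × List Int)) : (List (String × List String)) × List String :=
  -- dict2_sets = {id2: set(numbers) for id2, numbers in dict2.items()}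
  let dict2_sets : PySem.Dict String (PySem.Set Int) :=
    dict2.foldl (fun d p => d.insert p.1 (PySem.Set.ofList p.2)) PySem.Dict.empty
  -- for id1, numbers1 in dict1.items(): …
  let res := dict1.foldl (fun st p =>
    let set1 := PySem.Set.ofList p.2
    let mtc : PySem.Dict String Int :=
      dict2_sets.items.foldl (fun m q =>
        let shared := PySem.Set.inter set1 q.2
        if shared ≠ [] then m.insert q.1 (PySem.Set.len shared) else m) PySem.Dict.empty
    if mtc.items ≠ [] then
      -- sorted(matches.items(), key=lambda x: (-x[1], x[0])) — toLex gives Python's tuple order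
      (st.1.insert p.1 ((PySem.List.sorted mtc.items (fun x => toLex (-x.2, x.1))).map (fun x => x.1)), st.2)
    else (st.1, st.2 ++ [p.1])) (PySem.Dict.empty, ([] : List String))
  (res.1.items, res.2)

-- ===== PORT B =====
def categorize_and_sort_matches_alt (dict1 : List (String × List Int)) (dict2 : List (String × List Int)) : (List (String × List String)) × List String :=
  -- Stage 1: inverted index — for id2, numbers: for n in dict.fromkeys(numbers): index.setdefault(n, []).append(id2)
  let index : PySem.Dict Int (List String) :=
    dict2.foldl (fun d p =>
      (PySem.List.dedup p.2).foldl (fun d n => d.modify n [] (fun l => l ++ [p.1])) d) PySem.Dict.empty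
  -- Stage 2: ranked(numbers1) = sorted(counts, key=lambda id2: (-counts[id2], id2))
  --   counts[id2] (always present: id2 is a key of counts) is ported as getD id2 0
  let ranked : List Int → List String := fun ns =>
    let counts : PySem.Dict String Int :=
      (PySem.List.dedup ns).foldl (fun c n =>
        (index.getD n []).foldl (fun c id2 => c.insert id2 (c.getD id2 0 + 1)) c) PySem.Dict.empty
    PySem.List.sorted counts.keys (fun id2 => toLex (-(counts.getD id2 0), id2))
  -- Stage 3: pairs = [(id1, ranked(ns)) …]; split by truthiness of the ranking
  let pairs := dict1.map (fun p => (p.1, ranked p.2))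
  let has : PySem.Dict String (List String) :=
    (pairs.filter (fun q => decide (q.2 ≠ []))).foldl (fun d q => d.insert q.1 q.2) PySem.Dict.empty
  (has.items, (pairs.filter (fun q => decide (q.2 = []))).map Prod.fst)

-- ===== PRECONDITION & SPEC =====
-- Pre_ excludes association lists whose dict2 keys are duplicated: such lists do not represent a
-- Python dict (A's argument), and A's overwrite-vs-B's-merge reading of them is accidental.
def Pre_categorize_and_sort_matches (dict1 : List (String × List Int)) (dict2 : List (String × List Int)) : Prop :=
  (dict2.map Prod.fst).Nodup
instance (dict1 : List (String × List Int)) (dict2 : List (String × List Int)) : Decidable (Pre_categorize_and_sort_matches dict1 dict2) := by unfold Pre_categorize_and_sort_matches; infer_instance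
def pvWitness_categorize_and_sort_matches : (List (String × List Int)) × (List (String × List Int)) :=
  ([("a", [1, 2, 3]), ("b", [7])], [("x", [2, 3, 9]), ("y", [3]), ("z", [8])])
def Spec_categorize_and_sort_matches (dict1 : List (String × List Int)) (dict2 : List (String × List Int)) (out : (List (String × List String)) × List String) : Prop := out = categorize_and_sort_matches_alt dict1 dict2
instance (dict1 : List (String × List Int)) (dict2 : List (String × List Int)) (out : (List (String × List String)) × List String) : Decidable (Spec_categorize_and_sort_matches dict1 dict2 out) := by unfold Spec_categorize_and_sort_matches; infer_instance

-- ===== CLAIM (what is proved, stated in full; the proofs are below) =====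
def Claim_equal_categorize_and_sort_matches : Prop := ∀ (dict1 : List (String × List Int)) (dict2 : List (String × List Int)), Dom_categorize_and_sort_matches dict1 dict2 → Pre_categorize_and_sort_matches dict1 dict2 → Spec_categorize_and_sort_matches dict1 dict2 (categorize_and_sort_matches dict1 dict2)

-- ===== LEMMAS AND PROOFS =====

-- A's per-id1 matches dict (over the already-built {id2: set(numbers)} items)
def pvMA (dict2 : List (String × List Int)) (ns1 : List Int) : PySem.Dict String Int :=
  (dict2.map (fun p => (p.1, PySem.Set.ofList p.2))).foldl (fun m q =>
    if PySem.Set.inter (PySem.Set.ofList ns1) q.2 ≠ [] then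
      m.insert q.1 (PySem.Set.len (PySem.Set.inter (PySem.Set.ofList ns1) q.2))
    else m) PySem.Dict.empty

-- B's inverted index and per-id1 counts dict
def pvIdx (dict2 : List (String × List Int)) : PySem.Dict Int (List String) :=
  dict2.foldl (fun d p =>
    (PySem.List.dedup p.2).foldl (fun d n => d.modify n [] (fun l => l ++ [p.1])) d) PySem.Dict.empty

def pvMB (dict2 : List (String × List Int)) (ns1 : List Int) : PySem.Dict String Int :=
  (PySem.List.dedup ns1).foldl (fun c n =>
    ((pvIdx dict2).getD n []).foldl (fun c id2 => c.insert id2 (c.getD id2 0 + 1)) c) PySem.Dict.empty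

-- A's and B's per-id1 ranking lists
def pvRkA (dict2 : List (String × List Int)) (ns1 : List Int) : List String :=
  (PySem.List.sorted (pvMA dict2 ns1).items (fun x => toLex (-x.2, x.1))).map (fun x => x.1)

def pvRkB (dict2 : List (String × List Int)) (ns1 : List Int) : List String :=
  PySem.List.sorted (pvMB dict2 ns1).keys (fun k => toLex (-((pvMB dict2 ns1).getD k 0), k))

-- the number of shared (distinct) numbers between ns1 and the entry p0 of dict2
def pvCnt (ns1 : List Int) (p0 : String × List Int) : Int :=
  (((PySem.List.dedup ns1).filter (fun n => decide (n ∈ p0.2))).length : Int)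

theorem pvEntryEq {dict2 : List (String × List Int)} (hnd : (dict2.map Prod.fst).Nodup)
    {p q : String × List Int} (hp : p ∈ dict2) (hq : q ∈ dict2) (h : p.1 = q.1) : p = q :=
  List.inj_on_of_nodup_map hnd hp hq h

theorem pvFilterNodup (l : List Int) (n : Int) (h : l.Nodup) :
    l.filter (fun m => m == n) = if n ∈ l then [n] else [] := by
  induction l with
  | nil => simp
  | cons a t ih =>
    simp only [List.nodup_cons] at h
    by_cases ha : a = n
    · subst ha
      have ht : t.filter (fun m => m == a) = [] := by
        rw [List.filter_eq_nil_iff]; intro b hb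
        simp only [beq_iff_eq]; intro hba; exact h.1 (hba ▸ hb)
      simp [List.filter_cons, ht]
    · have hne : (a == n) = false := by simp [ha]
      have hna : ¬ n = a := fun he => ha he.symm
      simp [List.filter_cons, hne, ih h.2, hna]

-- Python's set intersection, on set(ns1) and set(ns2), as an ordered filter
theorem pvInter (ns1 ns2 : List Int) :
    PySem.Set.inter (PySem.Set.ofList ns1) (PySem.Set.ofList ns2)
      = (PySem.List.dedup ns1).filter (fun n => decide (n ∈ ns2)) := by
  rw [PySem.List.dedup_eq_ofList]
  show (PySem.Set.ofList ns1).filter (fun x => (PySem.Set.ofList ns2).contains x) = _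
  apply List.filter_congr
  intro x _
  simp [PySem.Set.mem_ofList]

-- ===== index characterization (B) =====
theorem pvIdx_inner (ns : List Int) (id2 : String) (d : PySem.Dict Int (List String)) (n : Int) :
    ((PySem.List.dedup ns).foldl (fun d m => d.modify m [] (fun l => l ++ [id2])) d).getD n []
      = d.getD n [] ++ if n ∈ ns then [id2] else [] := by
  have h1 : ((PySem.List.dedup ns).map (fun m => (m, id2))).foldl
      (fun d (p : Int × String) => d.modify p.1 [] (fun l => l ++ [p.2])) d
      = (PySem.List.dedup ns).foldl (fun d m => d.modify m [] (fun l => l ++ [id2])) d :=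
    List.foldl_map
  rw [← h1, PySem.Dict.getD_foldl_modify_append]
  congr 1
  rw [List.filter_map]
  have h2 : ((PySem.List.dedup ns).filter ((fun (p : Int × String) => p.1 == n) ∘ (fun m => (m, id2))))
      = (PySem.List.dedup ns).filter (fun m => m == n) := rfl
  rw [h2, pvFilterNodup _ _ (PySem.List.dedup_eq_ofList ns ▸ PySem.Set.nodup_ofList ns)]
  by_cases h : n ∈ ns
  · have : n ∈ PySem.List.dedup ns := (PySem.List.mem_dedup ns n).mpr h
    simp [h, this]
  · have : n ∉ PySem.List.dedup ns := fun hc => h ((PySem.List.mem_dedup ns n).mp hc)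
    simp [h, this]

theorem pvIdx_getD_gen (l : List (String × List Int)) (d : PySem.Dict Int (List String)) (n : Int) :
    (l.foldl (fun d p =>
        (PySem.List.dedup p.2).foldl (fun d m => d.modify m [] (fun s => s ++ [p.1])) d) d).getD n []
      = d.getD n [] ++ (l.filter (fun p => decide (n ∈ p.2))).map Prod.fst := by
  induction l generalizing d with
  | nil => simp
  | cons a t ih =>
    simp only [List.foldl_cons]
    rw [ih, pvIdx_inner]
    by_cases h : n ∈ a.2 <;> simp [h, List.filter_cons]

theorem pvIdx_getD (dict2 : List (String × List Int)) (n : Int) :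
    (pvIdx dict2).getD n [] = (dict2.filter (fun p => decide (n ∈ p.2))).map Prod.fst := by
  unfold pvIdx
  rw [pvIdx_getD_gen]
  simp [PySem.Dict.getD_empty]

-- count of an id2 in an index bucket, given unique dict2 keys
theorem pvCountIdx {dict2 : List (String × List Int)} (hnd : (dict2.map Prod.fst).Nodup)
    {p0 : String × List Int} (hp0 : p0 ∈ dict2) (n : Int) :
    ((pvIdx dict2).getD n []).count p0.1 = if n ∈ p0.2 then 1 else 0 := by
  rw [pvIdx_getD]
  have hsub : ((dict2.filter (fun p => decide (n ∈ p.2))).map Prod.fst).Sublist (dict2.map Prod.fst) :=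
    List.Sublist.map Prod.fst List.filter_sublist
  have hnd' : ((dict2.filter (fun p => decide (n ∈ p.2))).map Prod.fst).Nodup :=
    List.Nodup.sublist hsub hnd
  by_cases h : n ∈ p0.2
  · rw [if_pos h]
    apply List.count_eq_one_of_mem hnd'
    exact List.mem_map_of_mem (List.mem_filter.mpr ⟨hp0, by simpa using h⟩)
  · rw [if_neg h]
    apply List.count_eq_zero_of_not_mem
    intro hmem
    rcases List.mem_map.mp hmem with ⟨p', hp', he⟩
    rcases List.mem_filter.mp hp' with ⟨hp'2, hcond⟩
    have : p' = p0 := pvEntryEq hnd hp'2 hp0 he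
    subst this
    exact h (by simpa using hcond)

-- ===== A's matches dict, explicitly =====
theorem pvMA_gen (s1 : PySem.Set Int) (L : List (String × PySem.Set Int)) (m : PySem.Dict String Int)
    (hnd : (L.map Prod.fst).Nodup) (hc : ∀ q ∈ L, m.contains q.1 = false) :
    (L.foldl (fun m q =>
        if PySem.Set.inter s1 q.2 ≠ [] then m.insert q.1 (PySem.Set.len (PySem.Set.inter s1 q.2)) else m) m).items
      = m.items ++ (L.filter (fun q => decide (PySem.Set.inter s1 q.2 ≠ []))).map
          (fun q => (q.1, PySem.Set.len (PySem.Set.inter s1 q.2))) := by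
  induction L generalizing m with
  | nil => simp
  | cons a t ih =>
    simp only [List.map_cons, List.nodup_cons] at hnd
    simp only [List.foldl_cons]
    by_cases h : PySem.Set.inter s1 a.2 ≠ []
    · rw [if_pos h]
      have hca : m.contains a.1 = false := hc a List.mem_cons_self
      have hc' : ∀ q ∈ t, (m.insert a.1 (PySem.Set.len (PySem.Set.inter s1 a.2))).contains q.1 = false := by
        intro q hq
        rw [PySem.Dict.contains_insert]
        have hq1 : q.1 ≠ a.1 := fun he => hnd.1 (he ▸ List.mem_map_of_mem hq)
        simp [hq1, hc q (List.mem_cons_of_mem a hq)]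
      rw [ih _ hnd.2 hc', PySem.Dict.items_insert_of_not_contains _ _ hca]
      simp [List.filter_cons, h]
    · rw [if_neg h]
      rw [ih _ hnd.2 (fun q hq => hc q (List.mem_cons_of_mem a hq))]
      simp [List.filter_cons, h]

theorem pvMA_items (dict2 : List (String × List Int)) (ns1 : List Int)
    (hnd : (dict2.map Prod.fst).Nodup) :
    (pvMA dict2 ns1).items =
      ((dict2.map (fun p => (p.1, PySem.Set.ofList p.2))).filter
        (fun q => decide (PySem.Set.inter (PySem.Set.ofList ns1) q.2 ≠ []))).map
        (fun q => (q.1, PySem.Set.len (PySem.Set.inter (PySem.Set.ofList ns1) q.2))) := by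
  unfold pvMA
  rw [pvMA_gen]
  · rfl
  · simpa [List.map_map, Function.comp_def] using hnd
  · intro q _; exact PySem.Dict.contains_empty q.1

theorem pvMemA (dict2 : List (String × List Int)) (ns1 : List Int)
    (hnd : (dict2.map Prod.fst).Nodup) (k : String) (v : Int) :
    (k, v) ∈ (pvMA dict2 ns1).items ↔
      ∃ p0 ∈ dict2, p0.1 = k ∧ v = pvCnt ns1 p0 ∧ pvCnt ns1 p0 ≠ 0 := by
  rw [pvMA_items dict2 ns1 hnd]
  simp only [List.mem_map, List.mem_filter, List.mem_map]
  constructor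
  · rintro ⟨q, ⟨⟨p0, hp0, rfl⟩, hq⟩, he⟩
    refine ⟨p0, hp0, ?_, ?_, ?_⟩
    · exact (congrArg Prod.fst he).symm ▸ rfl
    · have := congrArg Prod.snd he
      simp only at this
      rw [← this, PySem.Set.len, pvInter, pvCnt]
    · rw [pvInter] at hq
      simp only [decide_eq_true_eq] at hq
      unfold pvCnt
      intro hz
      apply hq
      have : ((PySem.List.dedup ns1).filter (fun n => decide (n ∈ p0.2))).length = 0 := by
        exact_mod_cast hz
      exact List.length_eq_zero_iff.mp this
  · rintro ⟨p0, hp0, hk, hv, hnz⟩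
    refine ⟨(p0.1, PySem.Set.ofList p0.2), ⟨⟨p0, hp0, rfl⟩, ?_⟩, ?_⟩
    · rw [pvInter]
      simp only [decide_eq_true_eq]
      intro hnil
      apply hnz
      unfold pvCnt
      rw [hnil]
      simp
    · rw [PySem.Set.len, pvInter, hk]
      unfold pvCnt at hv
      rw [hv]

-- ===== B's counts dict: keys and values =====
theorem pvMB_nodup_gen (idx : PySem.Dict Int (List String)) (l : List Int)
    (c : PySem.Dict String Int) (h : c.keys.Nodup) :
    (l.foldl (fun c n =>
        (idx.getD n []).foldl (fun c id2 => c.insert id2 (c.getD id2 0 + 1)) c) c).keys.Nodup := by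
  induction l generalizing c with
  | nil => exact h
  | cons a t ih =>
    simp only [List.foldl_cons]
    exact ih _ (PySem.Dict.nodup_keys_foldl_insert _ _ _ h)

theorem pvMB_keys_nodup (dict2 : List (String × List Int)) (ns1 : List Int) :
    (pvMB dict2 ns1).keys.Nodup := by
  unfold pvMB
  exact pvMB_nodup_gen _ _ _ PySem.Dict.nodup_keys_empty

theorem pvMB_mem_gen (idx : PySem.Dict Int (List String)) (l : List Int)
    (c : PySem.Dict String Int) (k : String) :
    k ∈ (l.foldl (fun c n =>
        (idx.getD n []).foldl (fun c id2 => c.insert id2 (c.getD id2 0 + 1)) c) c).keys ↔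
      k ∈ c.keys ∨ ∃ n ∈ l, k ∈ idx.getD n [] := by
  induction l generalizing c with
  | nil => simp
  | cons a t ih =>
    simp only [List.foldl_cons]
    rw [ih]
    have hk : ((idx.getD a []).foldl (fun c id2 => c.insert id2 (c.getD id2 0 + 1)) c).keys
        = PySem.Set.update c.keys (idx.getD a []) := PySem.Dict.keys_foldl_insert _ _ _
    rw [hk]
    have hu : ∀ y, y ∈ PySem.Set.update c.keys (idx.getD a []) ↔ y ∈ c.keys ∨ y ∈ idx.getD a [] := by
      intro y
      show y ∈ (idx.getD a []).foldl (fun s b => PySem.Set.add s b) c.keys ↔ _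
      rw [PySem.Set.mem_foldl_add (idx.getD a []) (fun b => b) c.keys y]
      simp [eq_comm]
    rw [hu]
    constructor
    · rintro ((h | h) | h)
      · exact Or.inl h
      · exact Or.inr ⟨a, List.mem_cons_self, h⟩
      · rcases h with ⟨n, hn, hk2⟩; exact Or.inr ⟨n, List.mem_cons_of_mem a hn, hk2⟩
    · rintro (h | ⟨n, hn, hk2⟩)
      · exact Or.inl (Or.inl h)
      · rcases List.mem_cons.mp hn with rfl | hn'
        · exact Or.inl (Or.inr hk2)
        · exact Or.inr ⟨n, hn', hk2⟩

theorem pvMB_mem_keys (dict2 : List (String × List Int)) (ns1 : List Int) (k : String) :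
    k ∈ (pvMB dict2 ns1).keys ↔ ∃ n ∈ PySem.List.dedup ns1, k ∈ (pvIdx dict2).getD n [] := by
  unfold pvMB
  rw [pvMB_mem_gen]
  simp [PySem.Dict.keys_empty]

theorem pvMB_getD_gen (idx : PySem.Dict Int (List String)) (l : List Int)
    (c : PySem.Dict String Int) (k : String) :
    (l.foldl (fun c n =>
        (idx.getD n []).foldl (fun c id2 => c.insert id2 (c.getD id2 0 + 1)) c) c).getD k 0
      = c.getD k 0 + (l.map (fun n => (((idx.getD n []).count k : Nat) : Int))).sum := by
  induction l generalizing c with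
  | nil => simp
  | cons a t ih =>
    simp only [List.foldl_cons, List.map_cons, List.sum_cons]
    rw [ih, PySem.Dict.getD_foldl_insert_add_one]
    ring

theorem pvMB_getD (dict2 : List (String × List Int)) (ns1 : List Int)
    (hnd : (dict2.map Prod.fst).Nodup) {p0 : String × List Int} (hp0 : p0 ∈ dict2) :
    (pvMB dict2 ns1).getD p0.1 0 = pvCnt ns1 p0 := by
  unfold pvMB
  rw [pvMB_getD_gen]
  have h1 : ((PySem.List.dedup ns1).map (fun n => (((pvIdx dict2).getD n []).count p0.1 : Int)))
      = (PySem.List.dedup ns1).map (fun n => if decide (n ∈ p0.2) then (1 : Int) else 0) := by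
    apply List.map_congr_left
    intro n _
    rw [pvCountIdx hnd hp0 n]
    by_cases h : n ∈ p0.2 <;> simp [h]
  rw [h1, PySem.List.sum_map_ite_one_zero (fun n => decide (n ∈ p0.2)) (PySem.List.dedup ns1)]
  rw [List.countP_eq_length_filter]
  simp [pvCnt, PySem.Dict.getD_empty]

theorem pvGetSome (d : PySem.Dict String Int) (k : String) (v : Int) :
    d.get? k = some v ↔ (k ∈ d.keys ∧ d.getD k 0 = v) := by
  constructor
  · intro h
    refine ⟨?_, PySem.Dict.getD_of_get?_eq_some d 0 h⟩
    by_contra hk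
    rw [← PySem.Dict.get?_eq_none_iff_not_mem_keys] at hk
    rw [hk] at h
    simp at h
  · rintro ⟨hk, hg⟩
    cases hh : d.get? k with
    | none => exact absurd ((PySem.Dict.get?_eq_none_iff_not_mem_keys d k).mp hh) (by simpa using hk)
    | some w =>
      have := PySem.Dict.getD_of_get?_eq_some d 0 hh
      rw [this] at hg
      rw [hg]

theorem pvMemB (dict2 : List (String × List Int)) (ns1 : List Int)
    (hnd : (dict2.map Prod.fst).Nodup) (k : String) (v : Int) :
    (k, v) ∈ (pvMB dict2 ns1).items ↔
      ∃ p0 ∈ dict2, p0.1 = k ∧ v = pvCnt ns1 p0 ∧ pvCnt ns1 p0 ≠ 0 := by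
  rw [← PySem.Dict.get?_eq_some_iff_mem_items _ _ _ (pvMB_keys_nodup dict2 ns1)]
  rw [pvGetSome, pvMB_mem_keys]
  constructor
  · rintro ⟨⟨n0, hn0, hk0⟩, hg⟩
    rw [pvIdx_getD] at hk0
    rcases List.mem_map.mp hk0 with ⟨p0, hp0f, rfl⟩
    rcases List.mem_filter.mp hp0f with ⟨hp0, hcond⟩
    have hcnt : pvCnt ns1 p0 ≠ 0 := by
      unfold pvCnt
      have : n0 ∈ (PySem.List.dedup ns1).filter (fun n => decide (n ∈ p0.2)) :=
        List.mem_filter.mpr ⟨hn0, hcond⟩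
      intro hz
      have hlen : ((PySem.List.dedup ns1).filter (fun n => decide (n ∈ p0.2))).length = 0 := by
        exact_mod_cast hz
      rw [List.length_eq_zero_iff.mp hlen] at this
      exact List.not_mem_nil this
    exact ⟨p0, hp0, rfl, by rw [← hg, pvMB_getD dict2 ns1 hnd hp0], hcnt⟩
  · rintro ⟨p0, hp0, rfl, hv, hnz⟩
    have hex : ∃ n ∈ PySem.List.dedup ns1, decide (n ∈ p0.2) := by
      by_contra hc
      push_neg at hc
      apply hnz
      unfold pvCnt
      have : (PySem.List.dedup ns1).filter (fun n => decide (n ∈ p0.2)) = [] := by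
        rw [List.filter_eq_nil_iff]
        intro n hn
        simpa using hc n hn
      rw [this]
      simp
    rcases hex with ⟨n0, hn0, hcond⟩
    refine ⟨⟨n0, hn0, ?_⟩, ?_⟩
    · rw [pvIdx_getD]
      exact List.mem_map_of_mem (List.mem_filter.mpr ⟨hp0, hcond⟩)
    · rw [pvMB_getD dict2 ns1 hnd hp0, hv]

-- ===== the items lists agree up to order =====
theorem pvItemsA_nodup (dict2 : List (String × List Int)) (ns1 : List Int)
    (hnd : (dict2.map Prod.fst).Nodup) : (pvMA dict2 ns1).items.Nodup := by
  apply List.Nodup.of_map Prod.fst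
  rw [pvMA_items dict2 ns1 hnd]
  have he : (((dict2.map (fun p => (p.1, PySem.Set.ofList p.2))).filter
        (fun q => decide (PySem.Set.inter (PySem.Set.ofList ns1) q.2 ≠ []))).map
        (fun q => (q.1, PySem.Set.len (PySem.Set.inter (PySem.Set.ofList ns1) q.2)))).map Prod.fst
      = ((dict2.map (fun p => (p.1, PySem.Set.ofList p.2))).filter
        (fun q => decide (PySem.Set.inter (PySem.Set.ofList ns1) q.2 ≠ []))).map Prod.fst := by
    simp [List.map_map, Function.comp_def]
  rw [he]
  apply List.Nodup.sublist (List.Sublist.map Prod.fst List.filter_sublist)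
  simpa [List.map_map, Function.comp_def] using hnd

theorem pvItemsB_nodup (dict2 : List (String × List Int)) (ns1 : List Int) :
    (pvMB dict2 ns1).items.Nodup := by
  apply List.Nodup.of_map Prod.fst
  have : (pvMB dict2 ns1).items.map Prod.fst = (pvMB dict2 ns1).keys := by
    simp only [PySem.Dict.keys]
  rw [this]
  exact pvMB_keys_nodup dict2 ns1

theorem pvPerm (dict2 : List (String × List Int)) (ns1 : List Int)
    (hnd : (dict2.map Prod.fst).Nodup) :
    (pvMA dict2 ns1).items.Perm (pvMB dict2 ns1).items := by
  apply List.perm_of_nodup_nodup_toFinset_eq (pvItemsA_nodup dict2 ns1 hnd) (pvItemsB_nodup dict2 ns1)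
  ext p
  rcases p with ⟨k, v⟩
  simp only [List.mem_toFinset]
  rw [pvMemA dict2 ns1 hnd, pvMemB dict2 ns1 hnd]

theorem pvKeyInj : Function.Injective (fun x : String × Int => toLex ((-x.2 : Int), x.1)) := by
  rintro ⟨a1, a2⟩ ⟨b1, b2⟩ h
  have h' := congrArg (fun y => ofLex y) h
  simp only at h'
  have h1 : -a2 = -b2 := congrArg Prod.fst h'
  have h2 : a1 = b1 := congrArg Prod.snd h'
  simp only [neg_inj] at h1
  simp [h1, h2]

-- sorting the count dict's KEYS by (-count, key) = first components of sorting its ITEMS by (-v, k)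
theorem pvRank (dict2 : List (String × List Int)) (ns1 : List Int) :
    pvRkB dict2 ns1
      = (PySem.List.sorted (pvMB dict2 ns1).items (fun x => toLex (-x.2, x.1))).map (fun x => x.1) := by
  apply PySem.List.sorted_eq_of_perm_of_pairwise_lt
  · have hp : (PySem.List.sorted (pvMB dict2 ns1).items (fun x => toLex (-x.2, x.1))).Perm
        (pvMB dict2 ns1).items := PySem.List.sorted_perm _ _ _
    have := hp.map (fun x : String × Int => x.1)
    simpa [PySem.Dict.keys] using this
  · have hle : (PySem.List.sorted (pvMB dict2 ns1).items (fun x => toLex (-x.2, x.1))).Pairwise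
        (fun a b => (toLex (-a.2, a.1) : Lex (Int × String)) ≤ toLex (-b.2, b.1)) :=
      PySem.List.sorted_pairwise _ _
    have hndk : ((PySem.List.sorted (pvMB dict2 ns1).items (fun x => toLex (-x.2, x.1))).map
        (fun x : String × Int => x.1)).Nodup := by
      have hp : (PySem.List.sorted (pvMB dict2 ns1).items (fun x => toLex (-x.2, x.1))).Perm
          (pvMB dict2 ns1).items := PySem.List.sorted_perm _ _ _
      have := (hp.map (fun x : String × Int => x.1)).nodup_iff
      rw [this]
      have : (pvMB dict2 ns1).items.map (fun x : String × Int => x.1) = (pvMB dict2 ns1).keys := by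
        simp only [PySem.Dict.keys]
      rw [this]
      exact pvMB_keys_nodup dict2 ns1
    have hne : (PySem.List.sorted (pvMB dict2 ns1).items (fun x => toLex (-x.2, x.1))).Pairwise
        (fun a b => a.1 ≠ b.1) := (List.pairwise_map.mp hndk)
    have hmemv : ∀ x ∈ PySem.List.sorted (pvMB dict2 ns1).items (fun x => toLex (-x.2, x.1)),
        (pvMB dict2 ns1).getD x.1 0 = x.2 := by
      intro x hx
      obtain ⟨k, v⟩ := x
      have hxm : (k, v) ∈ (pvMB dict2 ns1).items := (PySem.List.mem_sorted _ _ _ _).mp hx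
      exact PySem.Dict.getD_of_mem_items _ hxm (pvMB_keys_nodup dict2 ns1) 0
    rw [List.pairwise_map]
    have hcomb := hle.and hne
    refine List.Pairwise.imp_of_mem ?_ hcomb
    intro a b ha hb hab
    have hga : (toLex (-((pvMB dict2 ns1).getD a.1 0), a.1) : Lex (Int × String))
        = toLex (-a.2, a.1) := by rw [hmemv a ha]
    have hgb : (toLex (-((pvMB dict2 ns1).getD b.1 0), b.1) : Lex (Int × String))
        = toLex (-b.2, b.1) := by rw [hmemv b hb]
    rw [hga, hgb]
    refine lt_of_le_of_ne hab.1 ?_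
    intro he
    exact hab.2 (congrArg (fun y => (ofLex y).2) he)

-- the per-id1 rankings of A and B coincide (unique dict2 keys)
theorem pvRkEq (dict2 : List (String × List Int)) (ns1 : List Int)
    (hnd : (dict2.map Prod.fst).Nodup) : pvRkA dict2 ns1 = pvRkB dict2 ns1 := by
  rw [pvRank]
  unfold pvRkA
  rw [PySem.List.sorted_eq_sorted_of_perm _ _ _ pvKeyInj (pvPerm dict2 ns1 hnd)]

-- A's single loop with two accumulators = B's staged map/filter decomposition
theorem pvStage (rk : List Int → List String) (l : List (String × List Int))
    (d : PySem.Dict String (List String)) (acc : List String) :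
    l.foldl (fun st p =>
        if rk p.2 ≠ [] then (st.1.insert p.1 (rk p.2), st.2) else (st.1, st.2 ++ [p.1])) (d, acc)
      = (((l.map (fun p => (p.1, rk p.2))).filter (fun q => decide (q.2 ≠ []))).foldl
            (fun d q => d.insert q.1 q.2) d,
         acc ++ (((l.map (fun p => (p.1, rk p.2))).filter (fun q => decide (q.2 = []))).map Prod.fst)) := by
  induction l generalizing d acc with
  | nil => simp
  | cons a t ih =>
    simp only [List.foldl_cons, List.map_cons, List.filter_cons]
    by_cases h : rk a.2 = []
    · simp only [h, ne_eq, not_true_eq_false, if_false, decide_false, decide_true, if_true,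
        decide_not]
      rw [ih]
      simp [h]
    · simp only [h, ne_eq, not_false_eq_true, if_true]
      rw [ih]
      simp [h]

-- ===== VERDICT (by name: the statement is the Claim_ definition above) =====
theorem categorize_and_sort_matches_spec : Claim_equal_categorize_and_sort_matches := by
  intro dict1 dict2 _ hpre
  unfold Pre_categorize_and_sort_matches at hpre
  unfold Spec_categorize_and_sort_matches
  unfold categorize_and_sort_matches categorize_and_sort_matches_alt
  have hitems : (dict2.foldl (fun d p => d.insert p.1 (PySem.Set.ofList p.2)) PySem.Dict.empty).items
      = dict2.map (fun p => (p.1, PySem.Set.ofList p.2)) := by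
    have h := PySem.Dict.items_foldl_insert_fresh dict2 (fun p => p.1)
      (fun p => PySem.Set.ofList p.2) PySem.Dict.empty
      (fun a _ => PySem.Dict.contains_empty a.1) hpre
    simpa using h
  simp only [hitems]
  -- A's loop, written with pvMA / pvRkA, then with conditions over pvRkA
  have hstep : ∀ (st : PySem.Dict String (List String) × List String) (p : String × List Int),
      (fun (st : PySem.Dict String (List String) × List String) (p : String × List Int) =>
        if (pvMA dict2 p.2).items ≠ [] then (st.1.insert p.1 (pvRkA dict2 p.2), st.2)
        else (st.1, st.2 ++ [p.1])) st p
      = (fun (st : PySem.Dict String (List String) × List String) (p : String × List Int) =>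
        if pvRkA dict2 p.2 ≠ [] then (st.1.insert p.1 (pvRkA dict2 p.2), st.2)
        else (st.1, st.2 ++ [p.1])) st p := by
    intro st p
    have hiff : ((pvMA dict2 p.2).items ≠ []) ↔ (pvRkA dict2 p.2 ≠ []) := by
      unfold pvRkA
      simp only [ne_eq, List.map_eq_nil_iff, PySem.List.sorted_eq_nil_iff]
    simp only
    exact if_congr hiff rfl rfl
  have hfoldA : dict1.foldl (fun (st : PySem.Dict String (List String) × List String) (p : String × List Int) =>
        if (pvMA dict2 p.2).items ≠ [] then (st.1.insert p.1 (pvRkA dict2 p.2), st.2)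
        else (st.1, st.2 ++ [p.1])) (PySem.Dict.empty, ([] : List String))
      = dict1.foldl (fun (st : PySem.Dict String (List String) × List String) (p : String × List Int) =>
        if pvRkA dict2 p.2 ≠ [] then (st.1.insert p.1 (pvRkA dict2 p.2), st.2)
        else (st.1, st.2 ++ [p.1])) (PySem.Dict.empty, ([] : List String)) :=
    PySem.List.foldl_congr_mem dict1 _ _ _ (fun st p _ => hstep st p)
  have hpairs : dict1.map (fun p => (p.1, pvRkA dict2 p.2))
      = dict1.map (fun p => (p.1, pvRkB dict2 p.2)) := by
    apply List.map_congr_left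
    intro p _
    rw [pvRkEq dict2 p.2 hpre]
  have hmain := hfoldA.trans (pvStage (pvRkA dict2) dict1 PySem.Dict.empty [])
  rw [hpairs] at hmain
  exact congrArg (fun (r : PySem.Dict String (List String) × List String) => (r.1.items, r.2)) hmain
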